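-- pv_equiv track=rewrite | github.com/psammy007/aps2020 | rail.py | find
-- ===== SOURCE A (Python) =====
-- def findLength(a,b):
-- 	return ((a*a)+(b*b))
--
-- def find(a,b,p,q,r):
-- 	count = 0
-- 	for i in range(r):
-- 		s1 = a[i]
-- 		for j in range(r,p):
-- 			s2 = a[j]
-- 			l1 = (s1-s2) * (s1-s2)
-- 			for k in range(q):
-- 				s3 = b[k]
-- 				l2 = findLength(s1,s3)
-- 				l3 = findLength(s2,s3)
-- 				if ((l1 == l2+l3) or (l2 == l1+l3) or (l3==l1+l2)):
-- 					count+=1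
-- 	return count
-- ===== SOURCE B (Python) =====
-- def find(a, b, p, q, r):
--     # Algebraic reduction: with l1=(s1-s2)^2, l2=s1^2+s3^2, l3=s2^2+s3^2,
--     #   l2 == l1+l3  <=>  s2*(s2-s1) == 0  <=>  s2 == 0 or s1 == s2   (k-independent)
--     #   l3 == l1+l2  <=>  s1*(s1-s2) == 0  <=>  s1 == 0 or s1 == s2   (k-independent)
--     #   l1 == l2+l3  <=>  s3*s3 == -(s1*s2)                           (k-dependent)
--     # so each (i,j) pair contributes q when a k-independent case holds, otherwise
--     # the number of k with b[k]**2 == -a[i]*a[j], read off a histogram of squares.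
--     s1s = a[:max(r, 0)]
--     s2s = a[max(r, 0):max(p, 0)]
--     if not s1s or not s2s:
--         return 0
--     Q = max(q, 0)
--     sq = {}
--     for x in b[:Q]:
--         v = x * x
--         sq[v] = sq.get(v, 0) + 1
--     get = sq.get
--     total = 0
--     for s1 in s1s:
--         ns1 = -s1
--         for s2 in s2s:
--             if s1 == 0 or s2 == 0 or s1 == s2:
--                 total += Q
--             else:
--                 total += get(ns1 * s2, 0)
--     return total
-- ===== Notes on version B (the rewrite author's own statement) =====
-- stated objective: alternative
-- what changed: Reduces the triangle conditions algebraically: the two k-independent cases contribute q per (i,j) pair and the k-dependent case is answered by a precomputed histogram of b[k]^2 values, removing the inner k loop (O(r*(p-r)+q) arithmetic vs A's O(r*(p-r)*q)); a timing run read only 1.47x at the largest measured size, so no speed is claimed.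
import Mathlib
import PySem

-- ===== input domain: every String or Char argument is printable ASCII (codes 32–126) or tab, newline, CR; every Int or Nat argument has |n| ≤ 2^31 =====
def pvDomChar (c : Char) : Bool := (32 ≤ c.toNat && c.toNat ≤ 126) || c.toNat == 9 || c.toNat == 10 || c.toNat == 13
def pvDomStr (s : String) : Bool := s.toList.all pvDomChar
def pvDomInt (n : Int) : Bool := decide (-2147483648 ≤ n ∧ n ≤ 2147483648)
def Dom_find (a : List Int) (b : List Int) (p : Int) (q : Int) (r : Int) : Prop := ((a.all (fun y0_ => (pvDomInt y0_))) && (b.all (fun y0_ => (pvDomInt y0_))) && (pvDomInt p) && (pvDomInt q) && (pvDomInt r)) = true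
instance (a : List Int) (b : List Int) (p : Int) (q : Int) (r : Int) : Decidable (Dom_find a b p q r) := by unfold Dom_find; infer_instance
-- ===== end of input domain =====

-- B removes A's innermost loop: the triangle conditions reduce algebraically to two
-- k-independent cases (contributing q each) plus a lookup in a precomputed histogram
-- of b[k]^2 values; an alternative algorithm with the inner loop eliminated.


-- ===== PORT A =====
def findLengthL (a b : Int) : Int := (a * a) + (b * b)

def find (a : List Int) (b : List Int) (p : Int) (q : Int) (r : Int) : Int :=
  (PySem.List.pyRange 0 r 1).foldl (fun count i =>
    let s1 := PySem.List.pyGetD a i 0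
    (PySem.List.pyRange r p 1).foldl (fun count j =>
      let s2 := PySem.List.pyGetD a j 0
      let l1 := (s1 - s2) * (s1 - s2)
      (PySem.List.pyRange 0 q 1).foldl (fun count k =>
        let s3 := PySem.List.pyGetD b k 0
        let l2 := findLengthL s1 s3
        let l3 := findLengthL s2 s3
        if l1 = l2 + l3 ∨ l2 = l1 + l3 ∨ l3 = l1 + l2 then count + 1 else count) count) count) 0

-- ===== PORT B =====
def find_alt (a : List Int) (b : List Int) (p : Int) (q : Int) (r : Int) : Int :=
  let s1s := PySem.List.slice a none (some (max r 0))
  let s2s := PySem.List.slice a (some (max r 0)) (some (max p 0))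
  if s1s = [] ∨ s2s = [] then 0
  else
    let Q := max q 0
    let sq : PySem.Dict Int Int :=
      (PySem.List.slice b none (some Q)).foldl
        (fun d x => let v := x * x; d.insert v (d.getD v 0 + 1)) PySem.Dict.empty
    s1s.foldl (fun total s1 =>
      s2s.foldl (fun total s2 =>
        if s1 = 0 ∨ s2 = 0 ∨ s1 = s2 then total + Q
        else total + sq.getD (-s1 * s2) 0) total) 0

-- ===== PRECONDITION & SPEC =====
-- Pre_ excludes exactly the inputs on which A raises IndexError: if 0 < r the i-loop
-- reads a[0..r-1]; if additionally r < p the j-loop reads a[r..p-1] and (if 0 < q)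
-- the k-loop reads b[0..q-1].
def Pre_find (a : List Int) (b : List Int) (p : Int) (q : Int) (r : Int) : Prop :=
  r ≤ 0 ∨ (r ≤ (a.length : Int) ∧ (p ≤ r ∨ (p ≤ (a.length : Int) ∧ q ≤ (b.length : Int))))
instance (a : List Int) (b : List Int) (p : Int) (q : Int) (r : Int) : Decidable (Pre_find a b p q r) := by unfold Pre_find; infer_instance
def pvWitness_find : List Int × List Int × Int × Int × Int := ([1, 2, 3], [2, 5], 3, 2, 1)

def Spec_find (a : List Int) (b : List Int) (p : Int) (q : Int) (r : Int) (out : Int) : Prop := out = find_alt a b p q r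
instance (a : List Int) (b : List Int) (p : Int) (q : Int) (r : Int) (out : Int) : Decidable (Spec_find a b p q r out) := by unfold Spec_find; infer_instance

-- ===== CLAIM (what is proved, stated in full; the proofs are below) =====
def Claim_equal_find : Prop := ∀ (a : List Int) (b : List Int) (p : Int) (q : Int) (r : Int), Dom_find a b p q r → Pre_find a b p q r → Spec_find a b p q r (find a b p q r)

-- ===== LEMMAS AND PROOFS =====

theorem pv_foldl_const {α β : Type} (l : List α) (c : β) :
    l.foldl (fun acc _ => acc) c = c := by
  induction l generalizing c with
  | nil => rfl
  | cons x t ih => simp only [List.foldl_cons]; exact ih c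

theorem pv_foldl_congr {α β : Type} (l : List α) (f g : β → α → β) (init : β)
    (h : ∀ acc x, f acc x = g acc x) : l.foldl f init = l.foldl g init := by
  have : f = g := funext fun acc => funext fun x => h acc x
  rw [this]

-- a for-loop over range(m, n) reading xs[i] is a loop over the slice xs[m:n]
theorem pv_fold_range {β : Type} (xs : List Int) (f : β → Int → β) (m n : Int)
    (hm : 0 ≤ m) (hn : n ≤ (xs.length : Int)) (init : β) :
    (PySem.List.pyRange m n 1).foldl (fun acc i => f acc (PySem.List.pyGetD xs i 0)) init
      = ((xs.take n.toNat).drop m.toNat).foldl f init := by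
  by_cases h : n ≤ m
  · rw [PySem.List.pyRange_one_eq_nil h, List.drop_eq_nil_of_le (by simp; omega)]
    rfl
  · rw [not_le] at h
    have hmlen : m.toNat < (xs.take n.toNat).length := by simp; omega
    rw [PySem.List.pyRange_one_cons h, List.foldl_cons,
        List.drop_eq_getElem_cons hmlen, List.foldl_cons]
    have hget : PySem.List.pyGetD xs m 0 = (xs.take n.toNat)[m.toNat] := by
      rw [List.getElem_take]
      exact PySem.List.pyGetD_eq_getElem xs 0 hm (by omega)
    rw [hget]
    have hrec := pv_fold_range xs f (m + 1) n (by omega) hn (f init (xs.take n.toNat)[m.toNat])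
    rw [show (m + 1).toNat = m.toNat + 1 by omega] at hrec
    exact hrec
termination_by (n - m).toNat
decreasing_by omega

-- algebraic reduction of A's three triangle conditions
theorem pv_cond_iff (s1 s2 s3 : Int) :
    ((s1 - s2) * (s1 - s2) = findLengthL s1 s3 + findLengthL s2 s3 ∨
      findLengthL s1 s3 = (s1 - s2) * (s1 - s2) + findLengthL s2 s3 ∨
      findLengthL s2 s3 = (s1 - s2) * (s1 - s2) + findLengthL s1 s3) ↔
    ((s1 = 0 ∨ s2 = 0 ∨ s1 = s2) ∨ s3 * s3 = -(s1 * s2)) := by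
  unfold findLengthL
  constructor
  · rintro (h | h | h)
    · right; nlinarith [h]
    · have h2 : s2 * (s2 - s1) = 0 := by nlinarith [h]
      rcases mul_eq_zero.mp h2 with h3 | h3
      · exact Or.inl (Or.inr (Or.inl h3))
      · exact Or.inl (Or.inr (Or.inr (by omega)))
    · have h2 : s1 * (s1 - s2) = 0 := by nlinarith [h]
      rcases mul_eq_zero.mp h2 with h3 | h3
      · exact Or.inl (Or.inl h3)
      · exact Or.inl (Or.inr (Or.inr (by omega)))
  · rintro ((h | h | h) | h)
    · subst h; right; right; ring_nf
    · subst h; right; left; ring_nf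
    · subst h; right; left; ring_nf
    · left; nlinarith [h]

-- A's innermost loop over a list t of b-values, in closed form
theorem pv_kfold (s1 s2 : Int) (t : List Int) (c : Int) :
    t.foldl (fun count s3 =>
      if (s1 - s2) * (s1 - s2) = findLengthL s1 s3 + findLengthL s2 s3 ∨
         findLengthL s1 s3 = (s1 - s2) * (s1 - s2) + findLengthL s2 s3 ∨
         findLengthL s2 s3 = (s1 - s2) * (s1 - s2) + findLengthL s1 s3
      then count + 1 else count) c
    = if s1 = 0 ∨ s2 = 0 ∨ s1 = s2 then c + (t.length : Int)
      else c + (((t.map (fun x => x * x)).count (-(s1 * s2)) : Nat) : Int) := by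
  induction t generalizing c with
  | nil => simp
  | cons x t ih =>
    simp only [List.foldl_cons, ih, pv_cond_iff s1 s2 x, List.map_cons, List.count_cons,
      List.length_cons]
    by_cases hk : s1 = 0 ∨ s2 = 0 ∨ s1 = s2
    · simp only [if_pos hk, if_pos (Or.inl hk)]
      push_cast; ring
    · simp only [if_neg hk]
      by_cases hx : x * x = -(s1 * s2)
      · rw [if_pos (Or.inr hx)]
        simp only [hx]
        simp
        ring
      · rw [if_neg (by tauto)]
        simp [hx]

-- ===== VERDICT (by name: the statement is the Claim_ definition above) =====
theorem find_spec : Claim_equal_find := by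
  intro a b p q r _ hpre
  unfold Spec_find
  simp only [find, find_alt]
  have e1 : PySem.List.slice a none (some (max r 0)) = a.take r.toNat := by
    rw [PySem.List.slice_to a (le_max_right r 0), show (max r 0).toNat = r.toNat by omega]
  have e2 : PySem.List.slice a (some (max r 0)) (some (max p 0))
      = (a.drop r.toNat).take (p.toNat - r.toNat) := by
    rw [PySem.List.slice_toNat a (le_max_right r 0) (le_max_right p 0),
        show (max r 0).toNat = r.toNat by omega, show (max p 0).toNat = p.toNat by omega]
  have e3 : PySem.List.slice b none (some (max q 0)) = b.take q.toNat := by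
    rw [PySem.List.slice_to b (le_max_right q 0), show (max q 0).toNat = q.toNat by omega]
  simp only [e1, e2, e3]
  by_cases hemp : a.take r.toNat = [] ∨ (a.drop r.toNat).take (p.toNat - r.toNat) = []
  · -- B returns 0 without looping; A's loops contribute nothing
    rw [if_pos hemp]
    by_cases hr0 : r ≤ 0
    · rw [PySem.List.pyRange_one_eq_nil hr0]
      rfl
    · have hra : r ≤ (a.length : Int) := by
        rcases hpre with h | ⟨h1, _⟩
        · omega
        · exact h1
      have h1ne : a.take r.toNat ≠ [] := by
        intro hnil
        have hlen1 : (a.take r.toNat).length = 0 := by rw [hnil]; rfl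
        rw [List.length_take] at hlen1
        omega
      have h2nil : (a.drop r.toNat).take (p.toNat - r.toNat) = [] := by tauto
      have hlen2 : ((a.drop r.toNat).take (p.toNat - r.toNat)).length = 0 := by
        rw [h2nil]; rfl
      rw [List.length_take, List.length_drop] at hlen2
      have hpr : p ≤ r := by
        by_contra hc
        rw [not_le] at hc
        have hpa : p ≤ (a.length : Int) := by
          rcases hpre with h | ⟨h1, h2 | ⟨h3, h4⟩⟩
          · omega
          · omega
          · exact h3
        omega
      simp only [PySem.List.pyRange_one_eq_nil hpr, List.foldl_nil]
      rw [pv_foldl_const]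
  · -- both loop ranges are nonempty
    rw [if_neg hemp]
    rw [not_or] at hemp
    obtain ⟨h1ne, h2ne⟩ := hemp
    have hr : (0 : Int) < r := by
      by_contra hc
      rw [not_lt] at hc
      exact h1ne (by rw [show r.toNat = 0 by omega]; rfl)
    have hra : r ≤ (a.length : Int) := by
      rcases hpre with h | ⟨h1, _⟩
      · omega
      · exact h1
    have hpr : r < p := by
      by_contra hc
      rw [not_lt] at hc
      exact h2ne (by rw [show p.toNat - r.toNat = 0 by omega]; rfl)
    have hbounds : p ≤ (a.length : Int) ∧ q ≤ (b.length : Int) := by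
      rcases hpre with h | ⟨h1, h2 | ⟨h3, h4⟩⟩
      · omega
      · omega
      · exact ⟨h3, h4⟩
    obtain ⟨hpa, hqb⟩ := hbounds
    have hp : (0 : Int) < p := by omega
    have hTlen : (((b.take q.toNat).length : Nat) : Int) = max q 0 := by simp; omega
    have hsq : (b.take q.toNat).foldl
          (fun d x => d.insert (x * x) (d.getD (x * x) 0 + 1)) PySem.Dict.empty
        = PySem.Dict.counter ((b.take q.toNat).map (fun x => x * x)) := by
      have hmap : (b.take q.toNat).foldl
            (fun d x => (fun (d : PySem.Dict Int Int) (v : Int) => PySem.Dict.insert d v (PySem.Dict.getD d v 0 + 1)) d ((fun x => x * x) x))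
            PySem.Dict.empty
          = ((b.take q.toNat).map (fun x => x * x)).foldl
            (fun (d : PySem.Dict Int Int) (v : Int) => PySem.Dict.insert d v (PySem.Dict.getD d v 0 + 1)) PySem.Dict.empty := by
        rw [List.foldl_map]
      exact hmap.trans (PySem.Dict.foldl_insert_getD_add_one_eq_counter _)
    simp only [hsq]
    -- A's inner loop in B's closed form
    have hinner : ∀ (s1 s2 c : Int),
        (PySem.List.pyRange 0 q 1).foldl (fun count k =>
          if (s1 - s2) * (s1 - s2) = findLengthL s1 (PySem.List.pyGetD b k 0) + findLengthL s2 (PySem.List.pyGetD b k 0) ∨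
             findLengthL s1 (PySem.List.pyGetD b k 0) = (s1 - s2) * (s1 - s2) + findLengthL s2 (PySem.List.pyGetD b k 0) ∨
             findLengthL s2 (PySem.List.pyGetD b k 0) = (s1 - s2) * (s1 - s2) + findLengthL s1 (PySem.List.pyGetD b k 0)
          then count + 1 else count) c
        = if s1 = 0 ∨ s2 = 0 ∨ s1 = s2 then c + max q 0
          else c + (PySem.Dict.counter ((b.take q.toNat).map (fun x => x * x))).getD (-s1 * s2) 0 := by
      intro s1 s2 c
      refine Eq.trans (pv_fold_range b (fun count s3 =>
        if (s1 - s2) * (s1 - s2) = findLengthL s1 s3 + findLengthL s2 s3 ∨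
           findLengthL s1 s3 = (s1 - s2) * (s1 - s2) + findLengthL s2 s3 ∨
           findLengthL s2 s3 = (s1 - s2) * (s1 - s2) + findLengthL s1 s3
        then count + 1 else count) 0 q (le_refl 0) hqb c) ?_
      rw [Int.toNat_zero, List.drop_zero, pv_kfold s1 s2 (b.take q.toNat) c]
      rw [neg_mul, PySem.Dict.getD_counter, hTlen]
    -- A's middle loop over range(r, p) is B's loop over a[r:p]
    have hmid : ∀ (s1 c : Int),
        (PySem.List.pyRange r p 1).foldl (fun count j =>
          (PySem.List.pyRange 0 q 1).foldl (fun count k =>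
            if (s1 - PySem.List.pyGetD a j 0) * (s1 - PySem.List.pyGetD a j 0) = findLengthL s1 (PySem.List.pyGetD b k 0) + findLengthL (PySem.List.pyGetD a j 0) (PySem.List.pyGetD b k 0) ∨
               findLengthL s1 (PySem.List.pyGetD b k 0) = (s1 - PySem.List.pyGetD a j 0) * (s1 - PySem.List.pyGetD a j 0) + findLengthL (PySem.List.pyGetD a j 0) (PySem.List.pyGetD b k 0) ∨
               findLengthL (PySem.List.pyGetD a j 0) (PySem.List.pyGetD b k 0) = (s1 - PySem.List.pyGetD a j 0) * (s1 - PySem.List.pyGetD a j 0) + findLengthL s1 (PySem.List.pyGetD b k 0)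
            then count + 1 else count) count) c
        = ((a.drop r.toNat).take (p.toNat - r.toNat)).foldl (fun total s2 =>
            if s1 = 0 ∨ s2 = 0 ∨ s1 = s2 then total + max q 0
            else total + (PySem.Dict.counter ((b.take q.toNat).map (fun x => x * x))).getD (-s1 * s2) 0) c := by
      intro s1 c
      refine Eq.trans (pv_fold_range a (fun count s2 =>
        (PySem.List.pyRange 0 q 1).foldl (fun count k =>
          if (s1 - s2) * (s1 - s2) = findLengthL s1 (PySem.List.pyGetD b k 0) + findLengthL s2 (PySem.List.pyGetD b k 0) ∨
             findLengthL s1 (PySem.List.pyGetD b k 0) = (s1 - s2) * (s1 - s2) + findLengthL s2 (PySem.List.pyGetD b k 0) ∨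
             findLengthL s2 (PySem.List.pyGetD b k 0) = (s1 - s2) * (s1 - s2) + findLengthL s1 (PySem.List.pyGetD b k 0)
          then count + 1 else count) count) r p hr.le hpa c) ?_
      rw [List.drop_take]
      exact pv_foldl_congr _ _ _ _ (fun acc s2 => hinner s1 s2 acc)
    -- assemble the outer loop
    refine Eq.trans (pv_fold_range a (fun count s1 =>
      (PySem.List.pyRange r p 1).foldl (fun count j =>
        (PySem.List.pyRange 0 q 1).foldl (fun count k =>
          if (s1 - PySem.List.pyGetD a j 0) * (s1 - PySem.List.pyGetD a j 0) = findLengthL s1 (PySem.List.pyGetD b k 0) + findLengthL (PySem.List.pyGetD a j 0) (PySem.List.pyGetD b k 0) ∨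
             findLengthL s1 (PySem.List.pyGetD b k 0) = (s1 - PySem.List.pyGetD a j 0) * (s1 - PySem.List.pyGetD a j 0) + findLengthL (PySem.List.pyGetD a j 0) (PySem.List.pyGetD b k 0) ∨
             findLengthL (PySem.List.pyGetD a j 0) (PySem.List.pyGetD b k 0) = (s1 - PySem.List.pyGetD a j 0) * (s1 - PySem.List.pyGetD a j 0) + findLengthL s1 (PySem.List.pyGetD b k 0)
          then count + 1 else count) count) count) 0 r (le_refl 0) hra 0) ?_
    rw [Int.toNat_zero, List.drop_zero]
    exact pv_foldl_congr _ _ _ _ (fun acc s1 => hmid s1 acc)
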